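-- pv_equiv track=rewrite | github.com/SirEOF/ctf-crypto | subst.py | matchTrigramsInText
-- ===== SOURCE A (Python) =====
-- def matchesTrigram(text, trigram):
-- 	if len(text) != 3 or len(trigram) != 3:
-- 		return False
--
-- 	trigram = trigram.lower()
-- 	text = text.lower()
--
-- 	remainingSpaces = 0
-- 	index = 0
-- 	for c in text:
-- 		if c == ' ' and remainingSpaces > 0:
-- 			remainingSpaces -= 1;
-- 		elif c != trigram[index]:
-- 			return False
-- 		index += 1
-- 	return True
--
-- def matchTrigramsInText(text):
-- 	trigrams = [
-- 	'the', 'and', 'tha', 'ent',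
-- 	'ing', 'ion', 'tio', 'for',
-- 	'nde', 'has', 'nce', 'edt',
-- 	'tis', 'oft', 'sth', 'men'
-- 	]
--
-- 	trigramCount = 1
--
-- 	for i in range(0, len(text) - 2):
-- 		threeCharText = text[i:i+3]
-- 		for trigram in trigrams:
-- 			if matchesTrigram(threeCharText, trigram):
-- 				trigramCount += 1
-- 	return trigramCount
-- ===== SOURCE B (Python) =====
-- _TRIGRAMS = [
--     'the', 'and', 'tha', 'ent',
--     'ing', 'ion', 'tio', 'for',
--     'nde', 'has', 'nce', 'edt',
--     'tis', 'oft', 'sth', 'men',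
-- ]
--
-- def matchTrigramsInText(text):
--     # Staged passes: lowercase once, then one whole-string substring count per trigram.
--     # Correct because no listed trigram self-overlaps (first char != last char), so
--     # str.count's non-overlapping count equals the number of matching start positions,
--     # and distinct trigrams never match the same position.
--     t = text.lower()
--     return 1 + sum(t.count(g) for g in _TRIGRAMS)
-- ===== Notes on version B (the rewrite author's own statement) =====
-- stated objective: faster
-- what changed: Replaces A's per-position window scan (each 3-char slice checked against all 16 trigrams by a stateful per-character matcher) with 16 whole-string substring counts: lowercase once, then sum t.count(g) over the fixed trigram list; correct because no listed trigram self-overlaps and trigrams are pairwise distinct, so non-overlapping counts add up to the matched-position count.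
import Mathlib
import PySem

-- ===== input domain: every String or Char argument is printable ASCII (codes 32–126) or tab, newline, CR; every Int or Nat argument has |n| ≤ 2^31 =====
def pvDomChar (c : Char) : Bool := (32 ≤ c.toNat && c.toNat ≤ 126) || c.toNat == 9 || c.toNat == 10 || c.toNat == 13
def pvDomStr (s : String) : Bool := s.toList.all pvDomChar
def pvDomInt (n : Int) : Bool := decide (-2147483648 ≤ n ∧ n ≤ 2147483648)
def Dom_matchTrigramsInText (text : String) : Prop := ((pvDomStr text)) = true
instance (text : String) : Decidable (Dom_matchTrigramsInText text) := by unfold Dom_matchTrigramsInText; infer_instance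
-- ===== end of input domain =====

-- B replaces A's per-position window scan (each window checked against all 16 trigrams by a
-- stateful per-character matcher) with 16 whole-string substring counts (lowercase once, then
-- sum of t.count(g)); equal because no listed trigram self-overlaps and they are pairwise
-- distinct. Objective: faster (measured; the work moves into whole-string substring counts).

-- ===== PORT A =====
-- the 16 trigram literals of A, as A stores them
def pvTrigrams : List (List Char) :=
  [['t','h','e'], ['a','n','d'], ['t','h','a'], ['e','n','t'],
   ['i','n','g'], ['i','o','n'], ['t','i','o'], ['f','o','r'],
   ['n','d','e'], ['h','a','s'], ['n','c','e'], ['e','d','t'],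
   ['t','i','s'], ['o','f','t'], ['s','t','h'], ['m','e','n']]

-- the 'for c in text' loop of matchesTrigram, with its early return; state = (remainingSpaces, index)
def pvMatchesLoop (g : List Char) : List Char → Int → Int → Bool
  | [], _, _ => true
  | c :: cs, rs, idx =>
    if c == ' ' && decide (rs > 0) then pvMatchesLoop g cs (rs - 1) (idx + 1)
    else if c != PySem.List.pyGetD g idx ' ' then false  -- trigram[index]; always in range here (both lengths are 3)
    else pvMatchesLoop g cs rs (idx + 1)

def pvMatchesTrigram (text trigram : List Char) : Bool :=
  if text.length ≠ 3 ∨ trigram.length ≠ 3 then false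
  else pvMatchesLoop (PySem.Chars.lower trigram) (PySem.Chars.lower text) 0 0

def matchTrigramsInText (text : String) : Int :=
  let tl := text.toList
  (PySem.List.pyRange 0 (PySem.Str.len text - 2) 1).foldl
    (fun trigramCount i =>
      let threeCharText := PySem.List.slice tl (some i) (some (i + 3))
      pvTrigrams.foldl (fun c g => if pvMatchesTrigram threeCharText g then c + 1 else c)
        trigramCount)
    1

-- ===== PORT B =====
-- the same 16 trigrams, as B stores them (Python string literals)
def pvTrigramStrs : List String :=
  ["the", "and", "tha", "ent",
   "ing", "ion", "tio", "for",
   "nde", "has", "nce", "edt",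
   "tis", "oft", "sth", "men"]

def matchTrigramsInText_alt (text : String) : Int :=
  let t := PySem.Str.lower text
  1 + (pvTrigramStrs.map (fun g => (PySem.Str.count t g : Int))).sum

-- ===== PRECONDITION & SPEC =====
def Spec_matchTrigramsInText (text : String) (out : Int) : Prop := out = matchTrigramsInText_alt text
instance (text : String) (out : Int) : Decidable (Spec_matchTrigramsInText text out) := by unfold Spec_matchTrigramsInText; infer_instance

-- ===== CLAIM (what is proved, stated in full; the proofs are below) =====
def Claim_equal_matchTrigramsInText : Prop := ∀ (text : String), Dom_matchTrigramsInText text → Spec_matchTrigramsInText text (matchTrigramsInText text)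

-- ===== LEMMAS AND PROOFS =====

-- no listed trigram self-overlaps: first and last characters differ
def pvNoOv (g : List Char) : Bool :=
  match g with
  | [x, _, z] => x != z
  | _ => false

-- number of start positions of the window [x,y,z] in a list, by structural sliding
def pvPosCnt (x y z : Char) : List Char → Nat
  | a :: b :: c :: r => (if a = x ∧ b = y ∧ c = z then 1 else 0) + pvPosCnt x y z (b :: c :: r)
  | _ => 0
termination_by l => l.length

-- the space branch of matchesTrigram is dead (remainingSpaces is always 0): on two 3-char
-- strings the loop is a lowercased character-by-character comparison
theorem pvMatchesTrigram_three (a b c x y z : Char) :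
    pvMatchesTrigram [a, b, c] [x, y, z]
      = (PySem.Chars.lower [a, b, c] == PySem.Chars.lower [x, y, z]) := by
  simp [pvMatchesTrigram, pvMatchesLoop, PySem.Chars.lower, PySem.List.pyGetD,
    PySem.List.pyIdx?, PySem.List.pyGet?]
  rfl

-- the inner 16-fold counts exactly one match when the lowered slice is a trigram, none otherwise
theorem pvCountP_matches (s : List Char) (hs : s.length = 3) :
    pvTrigrams.countP (fun g => pvMatchesTrigram s g)
      = if pvTrigrams.contains (PySem.Chars.lower s) then 1 else 0 := by
  match s, hs with
  | [a, b, c], _ =>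
    have h1 : pvTrigrams.countP (fun g => pvMatchesTrigram [a,b,c] g)
        = pvTrigrams.countP (fun g => PySem.Chars.lower [a,b,c] == g) := by
      refine List.countP_congr ?_
      intro g hg
      have h3 : g.length = 3 := (show ∀ g ∈ pvTrigrams, g.length = 3 by decide) g hg
      have hlow : PySem.Chars.lower g = g :=
        (show ∀ g ∈ pvTrigrams, PySem.Chars.lower g = g by decide) g hg
      match g, h3 with
      | [x, y, z], _ =>
        rw [pvMatchesTrigram_three, hlow]
    rw [h1]
    have h2 : pvTrigrams.countP (fun g => PySem.Chars.lower [a,b,c] == g)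
        = pvTrigrams.count (PySem.Chars.lower [a,b,c]) := by
      rw [List.count]
      exact List.countP_congr (fun g _ => by simp [BEq.comm])
    rw [h2]
    by_cases hm : PySem.Chars.lower [a,b,c] ∈ pvTrigrams
    · rw [List.count_eq_one_of_mem (by decide) hm, if_pos (by simpa using hm)]
    · rw [List.count_eq_zero_of_not_mem hm, if_neg (by simpa using hm)]

-- counting positions whose 3-slice is [x,y,z] over range equals the sliding recursion
theorem pvCountP_range_eq_posCnt (x y z : Char) : ∀ (l : List Char),
    (List.range (l.length - 2)).countP (fun k => (l.drop k).take 3 == [x, y, z])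
      = pvPosCnt x y z l
  | [] => by simp [pvPosCnt]
  | [_] => by simp [pvPosCnt]
  | [_, _] => by simp [pvPosCnt]
  | a :: b :: c :: r => by
    have IH := pvCountP_range_eq_posCnt x y z (b :: c :: r)
    have hlen : (a :: b :: c :: r).length - 2 = (r.length + 1) := by simp
    rw [hlen, List.range_succ_eq_map, List.countP_cons, List.countP_map]
    have hlen2 : (b :: c :: r).length - 2 = r.length := by simp
    rw [hlen2] at IH
    simp only [Function.comp_def, List.drop_succ_cons, List.drop_zero, List.take_succ_cons] at *
    rw [IH, pvPosCnt]
    by_cases hc : a = x ∧ b = y ∧ c = z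
    · obtain ⟨rfl, rfl, rfl⟩ := hc
      simp
      omega
    · rw [if_neg hc]
      have hb : ¬((([a, b, c] : List Char) == [x, y, z]) = true) := by simpa using hc
      simp [hb]

-- with x ≠ z, a match at some position kills the next two positions
theorem pvPosCnt_skip (x y z : Char) (h : x ≠ z) (r : List Char) :
    pvPosCnt x y z (y :: z :: r) = pvPosCnt x y z r := by
  match r with
  | [] => simp [pvPosCnt]
  | [d] =>
    rw [pvPosCnt]
    have h1 : ¬(y = x ∧ z = y ∧ d = z) := by rintro ⟨h1, h2, _⟩; exact h (h2.trans h1).symm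
    rw [if_neg h1]
    simp [pvPosCnt]
  | d :: e :: r' =>
    rw [pvPosCnt, pvPosCnt]
    have h1 : ¬(y = x ∧ z = y ∧ d = z) := by rintro ⟨h1, h2, _⟩; exact h (h1 ▸ h2.symm)
    have h2 : ¬(z = x ∧ d = y ∧ e = z) := by rintro ⟨h1, _, _⟩; exact h h1.symm
    rw [if_neg h1, if_neg h2]
    simp

-- the str.count worker: with enough fuel and a non-self-overlapping 3-pattern it counts
-- exactly the start positions
theorem pvGo_eq (x y z : Char) (h : x ≠ z) : ∀ (fuel : Nat) (s : List Char) (acc : Nat),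
    s.length ≤ fuel →
    PySem.Chars.count.go [x, y, z] fuel s acc = acc + pvPosCnt x y z s
  | 0, s, acc, hle => by
    have : s = [] := List.eq_nil_of_length_eq_zero (Nat.le_zero.mp hle)
    subst this
    simp [PySem.Chars.count.go, pvPosCnt]
  | fuel + 1, [], acc, _ => by simp [PySem.Chars.count.go, pvPosCnt]
  | fuel + 1, hd :: t, acc, hle => by
    rw [PySem.Chars.count.go]
    by_cases hp : List.isPrefixOf [x, y, z] (hd :: t) = true
    · rw [if_pos hp]
      obtain ⟨r, hr⟩ := List.isPrefixOf_iff_prefix.mp hp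
      have hs : hd :: t = x :: y :: z :: r := by simpa using hr.symm
      rw [show List.drop ([x,y,z] : List Char).length (hd :: t) = r by rw [hs]; rfl]
      have hlr : r.length ≤ fuel := by
        have h3 := congrArg List.length hs
        simp at h3
        simp at hle
        omega
      rw [pvGo_eq x y z h fuel r (acc + 1) hlr]
      cases hs
      rw [pvPosCnt, if_pos ⟨rfl, rfl, rfl⟩, pvPosCnt_skip x y z h r]
      omega
    · rw [if_neg hp]
      have hlt : t.length ≤ fuel := by simp at hle; omega
      rw [pvGo_eq x y z h fuel t acc hlt]
      match t with
      | [] => simp [pvPosCnt]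
      | [_] => simp [pvPosCnt]
      | b :: c :: r =>
        rw [pvPosCnt]
        have : ¬(hd = x ∧ b = y ∧ c = z) := by
          rintro ⟨rfl, rfl, rfl⟩
          exact hp (by simp [List.isPrefixOf])
        rw [if_neg this]
        simp
  termination_by fuel => fuel

theorem pvCount_eq (x y z : Char) (h : x ≠ z) (s : List Char) :
    PySem.Chars.count s [x, y, z] = pvPosCnt x y z s := by
  rw [PySem.Chars.count]
  rw [if_neg (by simp)]
  simpa using pvGo_eq x y z h s.length s 0 le_rfl

-- countP of a disjunction of disjoint predicates splits
theorem pvCountP_or_disjoint {α : Type} (p q : α → Bool) :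
    ∀ (l : List α), (∀ a ∈ l, ¬(p a = true ∧ q a = true)) →
    l.countP (fun a => p a || q a) = l.countP p + l.countP q
  | [], _ => by simp
  | a :: l, hd => by
    have IH := pvCountP_or_disjoint p q l (fun b hb => hd b (List.mem_cons_of_mem a hb))
    have ha := hd a (List.mem_cons_self)
    simp only [List.countP_cons, IH]
    cases hpa : p a <;> cases hqa : q a <;> simp_all <;> omega

-- membership count against a Nodup pattern list splits into one count per pattern
theorem pvCountP_contains_sum (f : Nat → List Char) :
    ∀ (G : List (List Char)), G.Nodup → ∀ (l : List Nat),
    l.countP (fun k => G.contains (f k)) = (G.map (fun g => l.countP (fun k => f k == g))).sum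
  | [], _, l => by simp
  | g :: G, hnd, l => by
    have hg : g ∉ G := (List.nodup_cons.mp hnd).1
    have IH := pvCountP_contains_sum f G (List.nodup_cons.mp hnd).2 l
    have hsplit : l.countP (fun k => (g :: G).contains (f k))
        = l.countP (fun k => f k == g) + l.countP (fun k => G.contains (f k)) := by
      have := pvCountP_or_disjoint (fun k => f k == g) (fun k => G.contains (f k)) l
        (fun k _ h => by
          obtain ⟨h1, h2⟩ := h
          have : f k = g := by simpa using h1
          exact hg (this ▸ (by simpa using h2)))
      rw [← this]
      exact List.countP_congr (fun k _ => by rw [List.contains_cons])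
    rw [hsplit, IH, List.map_cons, List.sum_cons]

-- ===== VERDICT (by name: the statement is the Claim_ definition above) =====
theorem matchTrigramsInText_spec : Claim_equal_matchTrigramsInText := by
  intro text _
  unfold Spec_matchTrigramsInText matchTrigramsInText matchTrigramsInText_alt
  simp only [PySem.Str.toList_lower, PySem.Str.len_eq, PySem.List.pyRange_one,
    PySem.Str.count_eq]
  set L := PySem.Chars.lower text.toList with hL
  rw [List.foldl_map]
  have hN : ((text.toList.length : Int) - 2 - 0).toNat = text.toList.length - 2 := by omega
  rw [hN]
  have hcongr : ∀ (cnt : Int), ∀ k ∈ List.range (text.toList.length - 2),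
      (pvTrigrams.foldl (fun c g =>
          if pvMatchesTrigram (PySem.List.slice text.toList (some (0 + (k:Int))) (some (0 + (k:Int) + 3))) g = true
          then c + 1 else c) cnt)
        = if pvTrigrams.contains ((L.drop k).take 3) then cnt + 1 else cnt := by
    intro cnt k hk
    have hk' : k < text.toList.length - 2 := List.mem_range.mp hk
    have h1 : (((k:Int)) + 3).toNat - ((k:Int)).toNat = 3 := by omega
    have h2 : ((k:Int)).toNat = k := by omega
    have hslice : PySem.List.slice text.toList (some (0 + (k:Int))) (some (0 + (k:Int) + 3))
        = (text.toList.drop k).take 3 := by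
      rw [zero_add, PySem.List.slice_toNat _ (by positivity) (by positivity), h1, h2]
    rw [hslice]
    rw [PySem.List.foldl_if_add_one (fun g => pvMatchesTrigram ((text.toList.drop k).take 3) g) pvTrigrams cnt]
    rw [pvCountP_matches _ (by simp only [List.length_take, List.length_drop]; omega)]
    have hcomm : PySem.Chars.lower ((text.toList.drop k).take 3) = (L.drop k).take 3 := by
      simp [hL, PySem.Chars.lower, List.map_take, List.map_drop]
    rw [hcomm]
    split <;> simp
  rw [PySem.List.foldl_congr_mem _ _ _ _ (fun cnt k hk => hcongr cnt k hk)]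
  rw [PySem.List.foldl_if_add_one (fun k => pvTrigrams.contains ((L.drop k).take 3)) _ 1]
  have hlen : text.toList.length = L.length := by simp [hL, PySem.Chars.lower]
  rw [hlen]
  rw [pvCountP_contains_sum (fun k => (L.drop k).take 3) pvTrigrams (by decide)
    (List.range (L.length - 2))]
  -- per-trigram: position count = Chars.count, since no trigram self-overlaps
  have hmap : pvTrigrams.map (fun g => (List.range (L.length - 2)).countP
        (fun k => (L.drop k).take 3 == g))
      = pvTrigramStrs.map (fun g => PySem.Chars.count L g.toList) := by
    have hGL : pvTrigrams = pvTrigramStrs.map String.toList := by decide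
    rw [hGL, List.map_map]
    refine List.map_congr_left (fun g hg => ?_)
    have hs := (show ∀ s ∈ pvTrigramStrs, pvNoOv s.toList = true by decide) g hg
    have hl3 := (show ∀ s ∈ pvTrigramStrs, s.toList.length = 3 by decide) g hg
    obtain ⟨x, y, z, hgl, hxz⟩ : ∃ x y z : Char, g.toList = [x, y, z] ∧ x ≠ z := by
      match hgl : g.toList, hl3 with
      | [x, y, z], _ =>
        rw [hgl] at hs
        exact ⟨x, y, z, rfl, by simpa [pvNoOv] using hs⟩
    simp only [Function.comp_def, hgl]
    rw [pvCountP_range_eq_posCnt x y z L, pvCount_eq x y z hxz L]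
  rw [hmap, Nat.cast_list_sum, List.map_map]
  simp [Function.comp_def]
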